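-- pv_equiv track=rewrite | github.com/umrlastig/tracklib | tracklib/core/Utils.py | compLike
-- ===== SOURCE A (Python) =====
-- def compLike(s1, s2):
--     tokens = s2.split('%')
--     if len(tokens) == 1:
--         return s1 in s2  # 'in' or 'equal' yet to be decided
--     occ = []
--     s = s1
--     d = len(s)
--     for tok in tokens:
--         id = s.find(tok)
--         if id < 0:
--             return False
--         occ.append(id)
--         s = s[id+len(tok):len(s)]
--     return True
-- ===== SOURCE B (Python) =====
-- def compLike(s1, s2):
--     if '%' not in s2:
--         return s1 in s2  # same reversed single-token containment as the original
--     # SQL-LIKE via the classic wildcard-match DP: pad the pattern with '%' on both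
--     # sides (the match is unanchored) and run the O(len(s1)*len(p)) row recurrence.
--     p = '%' + s2 + '%'
--     dp = [True]
--     for pc in p:
--         dp.append(dp[-1] and pc == '%')
--     for c in s1:
--         ndp = [False]
--         prev = False
--         for pc, a, b in zip(p, dp, dp[1:]):
--             prev = (prev or b) if pc == '%' else (a and pc == c)
--             ndp.append(prev)
--         dp = ndp
--     return dp[-1]
-- ===== Notes on version B (the rewrite author's own statement) =====
-- stated objective: alternative
-- what changed: B replaces A's token split + greedy find/cursor loop by a regex-engine-style wildcard-matching dynamic program over the padded pattern '%'+s2+'%' (one boolean row per character of s1); the single-token 's1 in s2' case is kept.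
import Mathlib
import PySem

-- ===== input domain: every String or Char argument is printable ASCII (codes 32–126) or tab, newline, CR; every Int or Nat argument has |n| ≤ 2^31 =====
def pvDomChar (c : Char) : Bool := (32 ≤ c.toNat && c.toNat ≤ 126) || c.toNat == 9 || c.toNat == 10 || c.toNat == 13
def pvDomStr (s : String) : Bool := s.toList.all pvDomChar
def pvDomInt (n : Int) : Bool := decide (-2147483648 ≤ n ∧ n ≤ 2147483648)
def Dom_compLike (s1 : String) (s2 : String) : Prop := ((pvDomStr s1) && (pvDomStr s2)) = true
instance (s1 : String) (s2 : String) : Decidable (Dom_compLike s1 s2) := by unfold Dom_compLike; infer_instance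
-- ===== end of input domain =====

-- B replaces A's token split + greedy find/cursor loop by a wildcard-matching dynamic program
-- over the padded pattern '%'+s2+'%' (one boolean row per character of s1); same return value.

-- ===== PORT A =====
-- A's for-loop: state is (occ, s); occ collects the find indices (never read), s is the rest.
-- A's local variable d = len(s1) is dead and dropped.
def compLikeLoopA : List (List Char) → List Int → List Char → Bool
  | [], _, _ => true
  | tok :: rest, occ, s =>
    let id := PySem.Chars.find s tok
    if id < 0 then false
    else compLikeLoopA rest (occ ++ [id])
           (PySem.Chars.slice s (some (id + (tok.length : Int))) (some ((PySem.Chars.len s : Int))))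

def compLike (s1 : String) (s2 : String) : Bool :=
  let tokens := PySem.Chars.splitOn s2.toList ['%']   -- s2.split('%'), sep nonempty
  if tokens.length == 1 then PySem.Chars.isIn s1.toList s2.toList   -- s1 in s2 (reversed, as in A)
  else compLikeLoopA tokens [] s1.toList

-- ===== PORT B =====
-- row 0 of the DP: dp.append(dp[-1] and pc == '%') walking the pattern
def dpInit : Bool → List Char → List Bool
  | _, [] => []
  | prev, pc :: p => let b := prev && (pc == '%'); b :: dpInit b p

-- inner loop over zip(p, dp, dp[1:]): prev = (prev or b) if pc == '%' else (a and pc == c)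
def dpStep (c : Char) : Bool → List Char → List Bool → List Bool
  | prev, pc :: p, a :: b :: rest =>
    let nd := if pc == '%' then (prev || b) else (a && (pc == c))
    nd :: dpStep c nd p (b :: rest)
  | _, _, _ => []

def compLike_alt (s1 : String) (s2 : String) : Bool :=
  if !(PySem.Chars.isIn ['%'] s2.toList) then PySem.Chars.isIn s1.toList s2.toList  -- s1 in s2
  else
    let p := '%' :: s2.toList ++ ['%']                 -- p = '%' + s2 + '%'
    let row0 := true :: dpInit true p                  -- dp = [True]; then the first for-loop
    let rows := s1.toList.foldl (fun dp c => false :: dpStep c false p dp) row0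
    rows.getLastD false                                -- dp[-1]; the row is never empty

-- ===== PRECONDITION & SPEC =====
def Spec_compLike (s1 : String) (s2 : String) (out : Bool) : Prop := out = compLike_alt s1 s2
instance (s1 : String) (s2 : String) (out : Bool) : Decidable (Spec_compLike s1 s2 out) := by unfold Spec_compLike; infer_instance

-- ===== CLAIM (what is proved, stated in full; the proofs are below) =====
def Claim_equal_compLike : Prop := ∀ (s1 : String) (s2 : String), Dom_compLike s1 s2 → Spec_compLike s1 s2 (compLike s1 s2)

-- ===== LEMMAS AND PROOFS =====

-- ---- the common specification: tokens appear left-to-right, in order, as disjoint substrings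
def MwL : List (List Char) → List Char → Prop
  | [], _ => True
  | t :: ts, s => ∃ u v, s = u ++ t ++ v ∧ MwL ts v

theorem MwL_suffix {ts : List (List Char)} {v r : List Char} (h : v <:+ r) (hm : MwL ts v) : MwL ts r := by
  cases ts with
  | nil => trivial
  | cons t ts =>
    obtain ⟨w, rfl⟩ := h
    obtain ⟨a, b, rfl, hb⟩ := hm
    exact ⟨w ++ a, b, by simp, hb⟩

theorem split_of_prefix_drop {tok s : List Char} {n : Nat} (h : tok <+: s.drop n) :
    s = s.take n ++ tok ++ s.drop (n + tok.length) := by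
  obtain ⟨w, hw⟩ := h
  have hdw : s.drop (n + tok.length) = w := by
    have h1 : (s.drop n).drop tok.length = w := by rw [← hw]; simp
    rw [← h1, List.drop_drop, Nat.add_comm]
  rw [hdw]
  conv_lhs => rw [← List.take_append_drop n s, ← hw]
  simp

-- ---- A's loop computes MwL
theorem loopA_eq (ts : List (List Char)) (occ : List Int) (s : List Char) :
    compLikeLoopA ts occ s = true ↔ MwL ts s := by
  induction ts generalizing occ s with
  | nil => simp [compLikeLoopA, MwL]
  | cons tok rest ih =>
    simp only [compLikeLoopA]
    by_cases hneg : PySem.Chars.find s tok < 0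
    · rw [if_pos hneg]
      simp only [MwL]
      refine iff_of_false (by simp) ?_
      rintro ⟨u, v, rfl, -⟩
      have : tok <:+: u ++ tok ++ v := ⟨u, v, by simp⟩
      have := (PySem.Chars.find_nonneg_iff (s := u ++ tok ++ v) (sub := tok)).mpr this
      omega
    · rw [if_neg hneg]
      rw [not_lt] at hneg
      obtain ⟨hpre, hmin⟩ := PySem.Chars.find_spec hneg
      have hlen : PySem.Chars.find s tok ≤ (s.length : Int) := PySem.Chars.find_le_length s tok
      set i : Nat := (PySem.Chars.find s tok).toNat with hi
      have hiI : PySem.Chars.find s tok = (i : Int) := by omega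
      have hile : i ≤ s.length := by omega
      have hslice : PySem.Chars.slice s (some (PySem.Chars.find s tok + (tok.length : Int)))
          (some ((PySem.Chars.len s : Int))) = s.drop (i + tok.length) := by
        rw [PySem.Chars.slice_eq_listSlice, hiI,
          PySem.List.slice_toNat _ (by positivity) (by simp [PySem.Chars.len_eq])]
        have h1 : ((i : Int) + (tok.length : Int)).toNat = i + tok.length := by omega
        have h2 : ((PySem.Chars.len s : Int)).toNat = s.length := by simp [PySem.Chars.len_eq]
        rw [h1, h2, List.take_of_length_le (by simp)]
      rw [hslice, ih]
      constructor
      · intro h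
        exact ⟨s.take i, s.drop (i + tok.length), split_of_prefix_drop hpre, h⟩
      · rintro ⟨u, v, hs, hv⟩
        have hocc : tok <+: s.drop u.length := by
          rw [hs, List.append_assoc, List.drop_left]
          exact ⟨v, rfl⟩
        have hiu : i ≤ u.length := by
          by_contra hc
          exact hmin u.length (by omega) hocc
        have hvsuf : v <:+ s.drop (i + tok.length) := by
          have hv' : s.drop (u.length + tok.length) = v := by
            rw [hs]
            have h3 : u.length + tok.length = (u ++ tok).length := by simp
            rw [h3, List.drop_left]
          have h2 : s.drop (u.length + tok.length) = (s.drop (i + tok.length)).drop (u.length - i) := by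
            rw [List.drop_drop]
            congr 1
            omega
          rw [← hv', h2]
          exact List.drop_suffix _ _
        exact MwL_suffix hvsuf hv

-- ---- a clean recursive model of s2.split('%')
def sp : List Char → List (List Char)
  | [] => [[]]
  | c :: rest => if c = '%' then [] :: sp rest else (c :: (sp rest).headD []) :: (sp rest).tail

theorem sp_cons (l : List Char) : (sp l).headD [] :: (sp l).tail = sp l := by
  cases l with
  | nil => simp [sp]
  | cons c rest => by_cases h : c = '%' <;> simp [sp, h]

theorem sp_ne_nil (l : List Char) : sp l ≠ [] := by
  intro hnil; have := sp_cons l; rw [hnil] at this; simp at this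

theorem go_eq_sp : ∀ (fuel : Nat) (l cur : List Char) (acc : List (List Char)), l.length < fuel →
    PySem.Chars.splitOn.go ['%'] fuel l cur acc
      = acc.reverse ++ (cur.reverse ++ (sp l).headD []) :: (sp l).tail := by
  intro fuel
  induction fuel with
  | zero => intro l cur acc h; omega
  | succ n ih =>
    intro l cur acc h
    cases l with
    | nil => simp [PySem.Chars.splitOn.go, sp]
    | cons c rest =>
      by_cases hc : c = '%'
      · subst hc
        have : PySem.Chars.splitOn.go ['%'] (n+1) ('%' :: rest) cur acc
            = PySem.Chars.splitOn.go ['%'] n rest [] (cur.reverse :: acc) := by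
          simp [PySem.Chars.splitOn.go, List.isPrefixOf]
        rw [this, ih rest [] _ (by simp at h; omega)]
        rw [show sp ('%' :: rest) = [] :: sp rest from by simp [sp]]
        cases hsp : sp rest with
        | nil => exact absurd hsp (sp_ne_nil rest)
        | cons a as => simp
      · have : PySem.Chars.splitOn.go ['%'] (n+1) (c :: rest) cur acc
            = PySem.Chars.splitOn.go ['%'] n rest (c :: cur) acc := by
          simp [PySem.Chars.splitOn.go, List.isPrefixOf, Ne.symm hc]
        rw [this, ih rest (c :: cur) _ (by simp at h; omega)]
        simp [sp, hc]

theorem splitOn_eq_sp (l : List Char) : PySem.Chars.splitOn l ['%'] = sp l := by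
  show PySem.Chars.splitOn.go ['%'] (l.length + 1) l [] [] = sp l
  rw [go_eq_sp (l.length + 1) l [] [] (by omega)]
  simpa using sp_cons l

theorem sp_length_one (l : List Char) : (sp l).length = 1 ↔ '%' ∉ l := by
  induction l with
  | nil => simp [sp]
  | cons c rest ih =>
    by_cases h : c = '%'
    · subst h
      rw [show sp ('%' :: rest) = [] :: sp rest from by simp [sp]]
      have hpos : 0 < (sp rest).length := List.length_pos_of_ne_nil (sp_ne_nil rest)
      simp only [List.length_cons]
      exact iff_of_false (by omega) (fun hf => hf List.mem_cons_self)
    · rw [show sp (c :: rest) = (c :: (sp rest).headD []) :: (sp rest).tail from by simp [sp, h]]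
      have hlen : (sp rest).length = (sp rest).tail.length + 1 := by
        cases hsp : sp rest with
        | nil => exact absurd hsp (sp_ne_nil rest)
        | cons a as => simp
      simp only [List.length_cons, List.mem_cons]
      rw [show (sp rest).tail.length + 1 = (sp rest).length from hlen.symm, ih]
      constructor
      · intro hf; rintro (rfl | hmem)
        · exact h rfl
        · exact hf hmem
      · intro hf hmem; exact hf (Or.inr hmem)

-- glue is the inverse of sp: rebuild the split string
def glue : List (List Char) → List Char
  | [] => []
  | [t] => t
  | t :: ts => t ++ '%' :: glue ts

theorem glue_cons_cons (t u : List Char) (ts : List (List Char)) :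
    glue (t :: u :: ts) = t ++ '%' :: glue (u :: ts) := by
  rfl

theorem glue_sp (l : List Char) : glue (sp l) = l := by
  induction l with
  | nil => simp [sp, glue]
  | cons c rest ih =>
    by_cases h : c = '%'
    · subst h
      rw [show sp ('%' :: rest) = [] :: sp rest from by simp [sp]]
      rw [← sp_cons rest] at ih ⊢
      rw [glue_cons_cons]
      simpa using ih
    · rw [show sp (c :: rest) = (c :: (sp rest).headD []) :: (sp rest).tail from by simp [sp, h]]
      rw [← sp_cons rest] at ih
      cases htl : (sp rest).tail with
      | nil =>
        rw [htl] at ih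
        simp [glue] at ih ⊢
        simpa using ih
      | cons a as =>
        rw [htl] at ih
        rw [glue_cons_cons] at ih ⊢
        simpa using ih

theorem sp_pctFree (l : List Char) : ∀ tok ∈ sp l, '%' ∉ tok := by
  induction l with
  | nil => simp [sp]
  | cons c rest ih =>
    by_cases h : c = '%'
    · subst h
      rw [show sp ('%' :: rest) = [] :: sp rest from by simp [sp]]
      intro tok htok
      rcases List.mem_cons.mp htok with rfl | hmem
      · simp
      · exact ih tok hmem
    · rw [show sp (c :: rest) = (c :: (sp rest).headD []) :: (sp rest).tail from by simp [sp, h]]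
      intro tok htok
      rcases List.mem_cons.mp htok with rfl | hmem
      · have hhd : (sp rest).headD [] ∈ sp rest := by
          rw [← sp_cons rest]; exact List.mem_cons_self
        have hfr := ih _ hhd
        intro hmem
        rcases List.mem_cons.mp hmem with heq | hmem'
        · exact h heq.symm
        · exact hfr hmem'
      · exact ih tok (by rw [← sp_cons rest]; exact List.mem_cons_of_mem _ hmem)

-- ---- the anchored wildcard matcher: Mb p t ↔ pattern p (with '%' wildcards) matches ALL of t
def Mb : List Char → List Char → Bool
  | [], t => t.isEmpty
  | pc :: p, t =>
    if pc = '%' then (List.range (t.length + 1)).any (fun k => Mb p (t.drop k))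
    else match t with
      | [] => false
      | c :: t' => (pc == c) && Mb p t'

theorem anyDrop_iff (g : List Char → Bool) (t : List Char) :
    ((List.range (t.length + 1)).any (fun k => g (t.drop k)) = true) ↔ ∃ u, u <:+ t ∧ g u = true := by
  simp only [List.any_eq_true, List.mem_range]
  constructor
  · rintro ⟨k, _, hg⟩
    exact ⟨t.drop k, List.drop_suffix k t, hg⟩
  · rintro ⟨u, ⟨w, rfl⟩, hg⟩
    refine ⟨w.length, by simp, ?_⟩
    rw [List.drop_left]
    exact hg

theorem Mb_pct_cons (p t : List Char) :
    Mb ('%' :: p) t = true ↔ ∃ u, u <:+ t ∧ Mb p u = true := by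
  rw [show Mb ('%' :: p) t = (List.range (t.length + 1)).any (fun k => Mb p (t.drop k)) from by
    simp [Mb]]
  exact anyDrop_iff _ _

theorem Mb_lit_cons {pc : Char} (h : pc ≠ '%') (p t : List Char) :
    Mb (pc :: p) t = true ↔ ∃ t', t = pc :: t' ∧ Mb p t' = true := by
  cases t with
  | nil => simp [Mb, h]
  | cons c t' =>
    rw [show Mb (pc :: p) (c :: t') = ((pc == c) && Mb p t') from by simp [Mb, h]]
    simp only [Bool.and_eq_true, beq_iff_eq, List.cons.injEq]
    constructor
    · rintro ⟨rfl, hm⟩; exact ⟨t', ⟨rfl, rfl⟩, hm⟩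
    · rintro ⟨t'', ⟨rfl, rfl⟩, hm⟩; exact ⟨rfl, hm⟩

-- snoc characterisations: the DP reads the pattern's LAST character
theorem Mb_snoc_pct_iff (q : List Char) : ∀ t : List Char,
    (Mb (q ++ ['%']) t = true ↔ ∃ u, u <+: t ∧ Mb q u = true) := by
  induction q with
  | nil =>
    intro t
    rw [List.nil_append, Mb_pct_cons]
    constructor
    · intro _; exact ⟨[], List.nil_prefix, rfl⟩
    · intro _; exact ⟨[], List.nil_suffix, rfl⟩
  | cons pc q' ih =>
    intro t
    by_cases hpc : pc = '%'
    · subst hpc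
      rw [List.cons_append, Mb_pct_cons]
      constructor
      · rintro ⟨s, hs, hm⟩
        obtain ⟨u, hu, hmu⟩ := (ih s).mp hm
        have hinf : u <:+: t := List.infix_iff_prefix_suffix.mpr ⟨s, hu, hs⟩
        obtain ⟨a, b, rfl⟩ := hinf
        refine ⟨a ++ u, ⟨b, by simp⟩, ?_⟩
        rw [Mb_pct_cons]
        exact ⟨u, ⟨a, rfl⟩, hmu⟩
      · rintro ⟨u, hu, hm⟩
        rw [Mb_pct_cons] at hm
        obtain ⟨v, hv, hmv⟩ := hm
        obtain ⟨w, rfl⟩ := hu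
        obtain ⟨z, rfl⟩ := hv
        exact ⟨v ++ w, ⟨z, by simp⟩, (ih (v ++ w)).mpr ⟨v, ⟨w, rfl⟩, hmv⟩⟩
    · cases t with
      | nil =>
        rw [show Mb ((pc :: q') ++ ['%']) [] = false from by simp [Mb, hpc]]
        simp only [Bool.false_eq_true, false_iff, not_exists]
        rintro u ⟨hu, hm⟩
        rw [List.prefix_nil] at hu
        subst hu
        rw [show Mb (pc :: q') [] = false from by simp [Mb, hpc]] at hm
        exact absurd hm (by simp)
      | cons c t' =>
        rw [List.cons_append, Mb_lit_cons hpc]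
        constructor
        · rintro ⟨s, hs, hm⟩
          injection hs with h1 h2
          subst h2
          obtain ⟨u, hu, hmu⟩ := (ih t').mp hm
          refine ⟨pc :: u, List.cons_prefix_cons.mpr ⟨h1.symm, hu⟩, ?_⟩
          rw [Mb_lit_cons hpc]
          exact ⟨u, rfl, hmu⟩
        · rintro ⟨u, hu, hm⟩
          rw [Mb_lit_cons hpc] at hm
          obtain ⟨u', rfl, hmu⟩ := hm
          obtain ⟨rfl, hu'⟩ := List.cons_prefix_cons.mp hu
          exact ⟨t', rfl, (ih t').mpr ⟨u', hu', hmu⟩⟩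

theorem Mb_snoc_lit_iff {d : Char} (hd : d ≠ '%') (q : List Char) : ∀ t : List Char,
    (Mb (q ++ [d]) t = true ↔ ∃ t', t = t' ++ [d] ∧ Mb q t' = true) := by
  induction q with
  | nil =>
    intro t
    rw [List.nil_append, Mb_lit_cons hd]
    constructor
    · rintro ⟨t', rfl, hm⟩
      have : t' = [] := by simpa [Mb] using hm
      subst this
      exact ⟨[], rfl, rfl⟩
    · rintro ⟨t', ht, hm⟩
      have : t' = [] := by simpa [Mb] using hm
      subst this
      exact ⟨[], by simpa using ht, rfl⟩
  | cons pc q' ih =>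
    intro t
    by_cases hpc : pc = '%'
    · subst hpc
      rw [List.cons_append, Mb_pct_cons]
      constructor
      · rintro ⟨s, hs, hm⟩
        obtain ⟨s', rfl, hms⟩ := (ih s).mp hm
        obtain ⟨w, rfl⟩ := hs
        refine ⟨w ++ s', by simp, ?_⟩
        rw [Mb_pct_cons]
        exact ⟨s', ⟨w, rfl⟩, hms⟩
      · rintro ⟨t', rfl, hm⟩
        rw [Mb_pct_cons] at hm
        obtain ⟨v, hv, hmv⟩ := hm
        refine ⟨v ++ [d], ?_, (ih (v ++ [d])).mpr ⟨v, rfl, hmv⟩⟩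
        obtain ⟨z, rfl⟩ := hv
        exact ⟨z, by simp⟩
    · cases t with
      | nil =>
        rw [show Mb ((pc :: q') ++ [d]) [] = false from by simp [Mb, hpc]]
        simp only [Bool.false_eq_true, false_iff, not_exists]
        rintro t' ⟨ht, _⟩
        exact absurd ht.symm (by simp)
      | cons c t' =>
        rw [List.cons_append, Mb_lit_cons hpc]
        constructor
        · rintro ⟨s, hs, hm⟩
          injection hs with h1 h2
          subst h2
          obtain ⟨w, rfl, hmw⟩ := (ih t').mp hm
          refine ⟨pc :: w, ?_, ?_⟩
          · rw [List.cons_append, h1]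
          · rw [Mb_lit_cons hpc]
            exact ⟨w, rfl, hmw⟩
        · rintro ⟨w, hw, hm⟩
          rw [Mb_lit_cons hpc] at hm
          obtain ⟨w', rfl, hmw⟩ := hm
          rw [List.cons_append] at hw
          obtain ⟨rfl, rfl⟩ : c = pc ∧ t' = w' ++ [d] := by
            injection hw with h1 h2; exact ⟨h1, h2⟩
          exact ⟨w' ++ [d], rfl, (ih (w' ++ [d])).mpr ⟨w', rfl, hmw⟩⟩

-- the three Boolean recurrences the DP rows use
theorem Mb_snoc_nil (q : List Char) (d : Char) :
    Mb (q ++ [d]) [] = (Mb q [] && (d == '%')) := by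
  by_cases hd : d = '%'
  · subst hd
    rw [Bool.eq_iff_iff, Mb_snoc_pct_iff]
    simp only [Bool.and_eq_true, beq_self_eq_true, and_true]
    constructor
    · rintro ⟨u, hu, hm⟩
      rw [List.prefix_nil] at hu
      subst hu; exact hm
    · intro hm; exact ⟨[], List.nil_prefix, hm⟩
  · rw [Bool.eq_iff_iff, Mb_snoc_lit_iff hd]
    simp [hd]

theorem Mb_snoc_lit (q t : List Char) {d : Char} (c : Char) (hd : d ≠ '%') :
    Mb (q ++ [d]) (t ++ [c]) = (Mb q t && (d == c)) := by
  rw [Bool.eq_iff_iff, Mb_snoc_lit_iff hd]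
  simp only [Bool.and_eq_true, beq_iff_eq]
  constructor
  · rintro ⟨t', ht, hm⟩
    obtain ⟨rfl, rfl⟩ : t = t' ∧ c = d := by
      have h1 : t.concat c = t'.concat d := by simpa [List.concat_eq_append] using ht
      have := List.concat_inj.mp h1
      exact ⟨this.1, this.2⟩
    exact ⟨hm, rfl⟩
  · rintro ⟨hm, rfl⟩
    exact ⟨t, rfl, hm⟩

theorem Mb_snoc_pct (q t : List Char) (c : Char) :
    Mb (q ++ ['%']) (t ++ [c]) = (Mb (q ++ ['%']) t || Mb q (t ++ [c])) := by
  rw [Bool.eq_iff_iff]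
  rw [Mb_snoc_pct_iff]
  simp only [Bool.or_eq_true]
  rw [Mb_snoc_pct_iff]
  constructor
  · rintro ⟨u, hu, hm⟩
    rcases List.prefix_concat_iff.mp hu with rfl | hu'
    · exact Or.inr hm
    · exact Or.inl ⟨u, hu', hm⟩
  · rintro (⟨u, hu, hm⟩ | hm)
    · exact ⟨u, hu.trans (List.prefix_append t [c]), hm⟩
    · exact ⟨t ++ [c], List.prefix_rfl, hm⟩

-- ---- the DP rows compute Mb on pattern prefixes
def rowIdeal (t : List Char) : List Char → List Char → List Bool
  | _, [] => []
  | q, d :: ps => Mb (q ++ [d]) t :: rowIdeal t (q ++ [d]) ps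

theorem dpInit_spec : ∀ (psuf q : List Char), dpInit (Mb q []) psuf = rowIdeal [] q psuf := by
  intro psuf
  induction psuf with
  | nil => intro q; rfl
  | cons d ps ih =>
    intro q
    show (Mb q [] && (d == '%')) :: dpInit (Mb q [] && (d == '%')) ps = _
    rw [← Mb_snoc_nil, ih (q ++ [d])]
    rfl

theorem dpStep_spec (c : Char) : ∀ (psuf q t : List Char),
    dpStep c (Mb q (t ++ [c])) psuf (Mb q t :: rowIdeal t q psuf) = rowIdeal (t ++ [c]) q psuf := by
  intro psuf
  induction psuf with
  | nil => intro q t; rfl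
  | cons d ps ih =>
    intro q t
    show dpStep c (Mb q (t ++ [c])) (d :: ps)
        (Mb q t :: Mb (q ++ [d]) t :: rowIdeal t (q ++ [d]) ps) = _
    rw [show dpStep c (Mb q (t ++ [c])) (d :: ps)
        (Mb q t :: Mb (q ++ [d]) t :: rowIdeal t (q ++ [d]) ps)
      = (if d == '%' then (Mb q (t ++ [c]) || Mb (q ++ [d]) t)
         else (Mb q t && (d == c)))
        :: dpStep c (if d == '%' then (Mb q (t ++ [c]) || Mb (q ++ [d]) t)
                     else (Mb q t && (d == c))) ps
             (Mb (q ++ [d]) t :: rowIdeal t (q ++ [d]) ps) from rfl]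
    have hval : (if d == '%' then (Mb q (t ++ [c]) || Mb (q ++ [d]) t)
         else (Mb q t && (d == c))) = Mb (q ++ [d]) (t ++ [c]) := by
      by_cases hd : d = '%'
      · subst hd
        rw [if_pos (by simp), Mb_snoc_pct, Bool.or_comm]
      · rw [if_neg (by simpa using hd), Mb_snoc_lit q t c hd]
    rw [hval, ih (q ++ [d]) t]
    rfl

theorem foldRows (p : List Char) : ∀ (cs t : List Char),
    cs.foldl (fun dp c => false :: dpStep c false p dp) (Mb [] t :: rowIdeal t [] p)
      = Mb [] (t ++ cs) :: rowIdeal (t ++ cs) [] p := by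
  intro cs
  induction cs with
  | nil => intro t; simp
  | cons c cs' ih =>
    intro t
    rw [List.foldl_cons]
    have hfalse : (false : Bool) = Mb [] (t ++ [c]) := by simp [Mb]
    have hstep : (false : Bool) :: dpStep c false p (Mb [] t :: rowIdeal t [] p)
        = Mb [] (t ++ [c]) :: rowIdeal (t ++ [c]) [] p := by
      rw [hfalse, dpStep_spec c p [] t]
    rw [hstep, ih (t ++ [c])]
    simp

theorem rowLast : ∀ (psuf q t : List Char) (dflt : Bool),
    (Mb q t :: rowIdeal t q psuf).getLastD dflt = Mb (q ++ psuf) t := by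
  intro psuf
  induction psuf with
  | nil => intro q t dflt; simp [rowIdeal]
  | cons d ps ih =>
    intro q t dflt
    show (Mb q t :: Mb (q ++ [d]) t :: rowIdeal t (q ++ [d]) ps).getLastD dflt = _
    rw [List.getLastD_cons, ih (q ++ [d]) t (Mb q t)]
    simp

-- ---- the wildcard matcher on '%'+glue ts+'%' is exactly MwL ts
theorem suffix_split (tok t : List Char) (P : List Char → Prop) :
    (∃ u, u <:+ t ∧ ∃ w, u = tok ++ w ∧ P w) ↔ ∃ a w, t = a ++ tok ++ w ∧ P w := by
  constructor
  · rintro ⟨u, ⟨a, rfl⟩, w, rfl, hP⟩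
    exact ⟨a, w, by simp, hP⟩
  · rintro ⟨a, w, rfl, hP⟩
    exact ⟨tok ++ w, ⟨a, by simp⟩, w, rfl, hP⟩

theorem Mb_lit_append (p : List Char) : ∀ (tok : List Char), '%' ∉ tok → ∀ (v : List Char),
    (Mb (tok ++ p) v = true ↔ ∃ w, v = tok ++ w ∧ Mb p w = true) := by
  intro tok
  induction tok with
  | nil => intro _ v; simp
  | cons a tok' ih =>
    intro hfree v
    have ha : a ≠ '%' := fun h => hfree (h ▸ List.mem_cons_self)
    rw [List.cons_append, Mb_lit_cons ha]
    constructor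
    · rintro ⟨v', rfl, hm⟩
      obtain ⟨w, rfl, hmw⟩ := (ih (fun h => hfree (List.mem_cons_of_mem _ h)) v').mp hm
      exact ⟨w, rfl, hmw⟩
    · rintro ⟨w, rfl, hmw⟩
      exact ⟨tok' ++ w, rfl,
        (ih (fun h => hfree (List.mem_cons_of_mem _ h)) (tok' ++ w)).mpr ⟨w, rfl, hmw⟩⟩

theorem Mb_pct_singleton (w : List Char) : Mb ['%'] w = true := by
  rw [Mb_pct_cons]
  exact ⟨[], List.nil_suffix, rfl⟩

theorem keyM : ∀ (ts : List (List Char)), ts ≠ [] → (∀ tok ∈ ts, '%' ∉ tok) →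
    ∀ t, (Mb ('%' :: (glue ts ++ ['%'])) t = true ↔ MwL ts t) := by
  intro ts
  induction ts with
  | nil => intro h; exact absurd rfl h
  | cons tok ts' ih =>
    intro _ hfree t
    cases ts' with
    | nil =>
      rw [show glue [tok] = tok from rfl]
      rw [Mb_pct_cons]
      have htokf : '%' ∉ tok := hfree tok List.mem_cons_self
      rw [show (∃ u, u <:+ t ∧ Mb (tok ++ ['%']) u = true)
          ↔ (∃ u, u <:+ t ∧ ∃ w, u = tok ++ w ∧ Mb ['%'] w = true) from
        exists_congr (fun u => and_congr_right (fun _ => Mb_lit_append ['%'] tok htokf u))]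
      rw [suffix_split tok t (fun w => Mb ['%'] w = true)]
      show (∃ a w, t = a ++ tok ++ w ∧ Mb ['%'] w = true) ↔ MwL [tok] t
      simp only [MwL, Mb_pct_singleton, and_true]
    | cons u' ts'' =>
      rw [glue_cons_cons]
      have hassoc : (tok ++ '%' :: glue (u' :: ts'')) ++ ['%']
          = tok ++ ('%' :: (glue (u' :: ts'') ++ ['%'])) := by simp
      rw [hassoc, Mb_pct_cons]
      have htokf : '%' ∉ tok := hfree tok List.mem_cons_self
      have hihfree : ∀ tk ∈ u' :: ts'', '%' ∉ tk := fun tk h => hfree tk (List.mem_cons_of_mem _ h)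
      rw [show (∃ u, u <:+ t ∧ Mb (tok ++ ('%' :: (glue (u' :: ts'') ++ ['%']))) u = true)
          ↔ (∃ u, u <:+ t ∧ ∃ w, u = tok ++ w ∧ Mb ('%' :: (glue (u' :: ts'') ++ ['%'])) w = true) from
        exists_congr (fun u => and_congr_right
          (fun _ => Mb_lit_append ('%' :: (glue (u' :: ts'') ++ ['%'])) tok htokf u))]
      rw [suffix_split tok t (fun w => Mb ('%' :: (glue (u' :: ts'') ++ ['%'])) w = true)]
      show (∃ a w, t = a ++ tok ++ w ∧ _) ↔ MwL (tok :: u' :: ts'') t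
      simp only [MwL]
      constructor
      · rintro ⟨a, w, rfl, hm⟩
        exact ⟨a, w, rfl, (ih (by simp) hihfree w).mp hm⟩
      · rintro ⟨a, w, rfl, hm⟩
        exact ⟨a, w, rfl, (ih (by simp) hihfree w).mpr hm⟩

-- ---- branch conditions agree
theorem singleton_infix_iff (l : List Char) : ['%'] <:+: l ↔ '%' ∈ l := by
  constructor
  · intro h; exact h.subset List.mem_cons_self
  · intro h
    obtain ⟨s, t, rfl⟩ := List.append_of_mem h
    exact ⟨s, t, by simp⟩

theorem branch_eq (l : List Char) :
    ((PySem.Chars.splitOn l ['%']).length == 1) = !(PySem.Chars.isIn ['%'] l) := by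
  rw [splitOn_eq_sp]
  by_cases h : '%' ∈ l
  · rw [Bool.eq_iff_iff]
    simp only [beq_iff_eq, Bool.not_eq_true', sp_length_one]
    constructor
    · intro hff; exact absurd h hff
    · intro hff
      rw [PySem.Chars.isIn_eq_false_iff] at hff
      exact absurd ((singleton_infix_iff l).mpr h) hff
  · rw [Bool.eq_iff_iff]
    simp only [beq_iff_eq, Bool.not_eq_true', sp_length_one]
    constructor
    · intro _
      rw [PySem.Chars.isIn_eq_false_iff, singleton_infix_iff]
      exact h
    · intro _; exact h

-- ===== VERDICT (by name: the statement is the Claim_ definition above) =====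
theorem compLike_spec : Claim_equal_compLike := by
  intro s1 s2 _
  simp only [Spec_compLike, compLike, compLike_alt]
  rw [branch_eq s2.toList]
  by_cases h : PySem.Chars.isIn ['%'] s2.toList
  · rw [if_neg (by simp [h]), if_neg (by simp [h])]
    have hmem : '%' ∈ s2.toList := by
      rw [← singleton_infix_iff, ← PySem.Chars.isIn_iff_infix]; exact h
    have hDP : (s1.toList.foldl (fun dp c => false :: dpStep c false ('%' :: s2.toList ++ ['%']) dp)
          (true :: dpInit true ('%' :: s2.toList ++ ['%']))).getLastD false
        = Mb ('%' :: s2.toList ++ ['%']) s1.toList := by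
      have h0 : (true : Bool) = Mb [] [] := by simp [Mb]
      rw [show (true : Bool) :: dpInit true ('%' :: s2.toList ++ ['%'])
          = Mb [] [] :: rowIdeal [] [] ('%' :: s2.toList ++ ['%']) from by
        rw [← dpInit_spec]; simp [Mb]]
      rw [foldRows, rowLast]
      simp
    rw [hDP]
    rw [Bool.eq_iff_iff, loopA_eq]
    rw [splitOn_eq_sp]
    have := keyM (sp s2.toList) (sp_ne_nil s2.toList) (sp_pctFree s2.toList) s1.toList
    rw [glue_sp] at this
    rw [← this]
    constructor <;> intro hx <;> simpa using hx
  · rw [if_pos (by simp [h]), if_pos (by simp [h])]
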